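-- pv_equiv track=rewrite | github.com/Park-hyojin/IoT_calculator | Calculator3.py | find_last_true_operator
-- ===== SOURCE A (Python) =====
-- def find_last_true_operator(expr: str) -> int:
--     for i in range(len(expr) - 1, -1, -1):
--         if expr[i] in "+*/":
--             return i
--         elif expr[i] == "-":
--             if i > 0 and expr[i - 1] not in "+-*/":
--                 return i
--     return -1
-- ===== SOURCE B (Python) =====
-- def find_last_true_operator(expr: str) -> int:
--     matches = [i for i in range(len(expr))
--                if expr[i] in "+*/"
--                or (expr[i] == "-" and i > 0 and expr[i - 1] not in "+-*/")]
--     return matches[-1] if matches else -1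
-- ===== Notes on version B (the rewrite author's own statement) =====
-- stated objective: alternative
-- what changed: Replaces the right-to-left early-return guarded scan with a forward comprehension that collects every true-operator position and returns the last one (or -1 if none).
import Mathlib
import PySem

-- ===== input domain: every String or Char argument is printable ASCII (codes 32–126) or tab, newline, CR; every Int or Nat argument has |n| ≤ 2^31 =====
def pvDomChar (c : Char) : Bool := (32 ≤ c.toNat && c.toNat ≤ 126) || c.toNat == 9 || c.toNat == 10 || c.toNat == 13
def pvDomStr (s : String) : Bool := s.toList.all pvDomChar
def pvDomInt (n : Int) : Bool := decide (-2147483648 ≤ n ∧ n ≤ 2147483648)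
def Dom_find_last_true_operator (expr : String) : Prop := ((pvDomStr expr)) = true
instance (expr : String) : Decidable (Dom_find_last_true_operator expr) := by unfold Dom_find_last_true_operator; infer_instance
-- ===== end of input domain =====

-- B replaces A's right-to-left early-return scan by collecting all operator positions
-- forward and taking the last; equivalence of return values is proved (alternative, not faster).

-- ===== PORT A =====
-- A: scan i = len-1 .. 0; return i on '+','*','/' or on a '-' whose predecessor
-- exists and is not an operator; -1 if the loop finishes.  Fuel n = i+1.
def pvGoA (cs : List Char) : Nat → Int
  | 0 => -1
  | (i+1) =>
    let c := cs.getD i ' '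
    if c = '+' ∨ c = '*' ∨ c = '/' then (i : Int)
    else if c = '-' then
      (if i > 0 ∧ ¬(cs.getD (i-1) ' ' = '+' ∨ cs.getD (i-1) ' ' = '-' ∨
                    cs.getD (i-1) ' ' = '*' ∨ cs.getD (i-1) ' ' = '/')
       then (i : Int) else pvGoA cs i)
    else pvGoA cs i

def find_last_true_operator (expr : String) : Int :=
  pvGoA expr.toList expr.toList.length

-- ===== PORT B =====
-- B's comprehension predicate for index i
def pvMatchB (cs : List Char) (i : Nat) : Bool :=
  let c := cs.getD i ' '
  (c = '+' || c = '*' || c = '/') ||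
  (c = '-' && decide (0 < i) &&
   !(cs.getD (i-1) ' ' = '+' || cs.getD (i-1) ' ' = '-' ||
     cs.getD (i-1) ' ' = '*' || cs.getD (i-1) ' ' = '/'))

def find_last_true_operator_alt (expr : String) : Int :=
  let cs := expr.toList
  let ms := (List.range cs.length).filter (pvMatchB cs)
  match ms.getLast? with
  | some i => (i : Int)
  | none => -1

-- ===== PRECONDITION & SPEC =====
def Spec_find_last_true_operator (expr : String) (out : Int) : Prop := out = find_last_true_operator_alt expr
instance (expr : String) (out : Int) : Decidable (Spec_find_last_true_operator expr out) := by unfold Spec_find_last_true_operator; infer_instance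

-- ===== CLAIM (what is proved, stated in full; the proofs are below) =====
def Claim_equal_find_last_true_operator : Prop := ∀ (expr : String), Dom_find_last_true_operator expr → Spec_find_last_true_operator expr (find_last_true_operator expr)

-- ===== LEMMAS AND PROOFS =====

-- A's step at fuel i+1 is: hit iff pvMatchB holds at i, else recurse.
theorem pvGoA_succ (cs : List Char) (i : Nat) :
    pvGoA cs (i+1) = if pvMatchB cs i then (i : Int) else pvGoA cs i := by
  simp only [pvGoA]
  by_cases hm : pvMatchB cs i = true
  · simp only [hm, if_true]
    simp only [pvMatchB, Bool.or_eq_true, Bool.and_eq_true, decide_eq_true_eq,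
      Bool.not_eq_true', Bool.or_eq_false_iff, decide_eq_false_iff_not] at hm
    split_ifs with h1 h2 h3 <;> first | rfl | tauto
  · simp only [Bool.not_eq_true] at hm
    simp only [hm]
    have hm' : ¬ (pvMatchB cs i = true) := by simp [hm]
    simp only [pvMatchB, Bool.or_eq_true, Bool.and_eq_true, decide_eq_true_eq,
      Bool.not_eq_true', Bool.or_eq_false_iff, decide_eq_false_iff_not] at hm'
    split_ifs with h1 h2 h3 <;> first | rfl | tauto

theorem pvGoA_eq_last (cs : List Char) (n : Nat) :
    pvGoA cs n = (match ((List.range n).filter (pvMatchB cs)).getLast? with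
      | some i => (i : Int) | none => -1) := by
  induction n with
  | zero => simp [pvGoA]
  | succ n ih =>
    rw [pvGoA_succ, List.range_succ, List.filter_append]
    by_cases h : pvMatchB cs n
    · simp [h]
    · simp [h, ih]

-- ===== VERDICT (by name: the statement is the Claim_ definition above) =====
theorem find_last_true_operator_spec : Claim_equal_find_last_true_operator := by
  intro expr _
  unfold Spec_find_last_true_operator find_last_true_operator find_last_true_operator_alt
  exact pvGoA_eq_last _ _
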